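-- pv_equiv track=rewrite | github.com/JoonHyeok-hozy-Kim/algorithm_study | BaekJoon/Review/Rev_221028/Sol_01_Week3_14939.py | count_turned_on
-- ===== SOURCE A (Python) =====
-- def count_turned_on(B, row=None):
--     cnt = 0
--     for i in range(10):
--         if row is not None and i != row:
--             continue
--         for j in range(10):
--             if B[i] & (1<<j):
--                 cnt += 1
--     return cnt
-- ===== SOURCE B (Python) =====
-- def count_turned_on(B, row=None):
--     # select the indices to count
--     if row is None:
--         idxs = range(10)
--     elif 0 <= row < 10:
--         idxs = [row]
--     else:
--         idxs = []
--     total = 0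
--     for i in idxs:
--         # SWAR popcount of the low 10 bits: parallel pairwise bit sums, no per-bit loop
--         x = B[i] & 0x3FF
--         x = x - ((x >> 1) & 0x5555)
--         x = (x & 0x3333) + ((x >> 2) & 0x3333)
--         x = (x + (x >> 4)) & 0x0F0F
--         total += (x + (x >> 8)) & 0x1F
--     return total
-- ===== Notes on version B (the rewrite author's own statement) =====
-- stated objective: alternative
-- what changed: A's nested 10x10 loop testing every bit with B[i] & (1<<j) is replaced by selecting the index list up front (range(10), [row] or []) and, per selected row, a branch-free SWAR popcount of the masked low 10 bits (parallel pairwise bit sums via shift/mask/add), so the per-bit inner loop disappears.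
import Mathlib
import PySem

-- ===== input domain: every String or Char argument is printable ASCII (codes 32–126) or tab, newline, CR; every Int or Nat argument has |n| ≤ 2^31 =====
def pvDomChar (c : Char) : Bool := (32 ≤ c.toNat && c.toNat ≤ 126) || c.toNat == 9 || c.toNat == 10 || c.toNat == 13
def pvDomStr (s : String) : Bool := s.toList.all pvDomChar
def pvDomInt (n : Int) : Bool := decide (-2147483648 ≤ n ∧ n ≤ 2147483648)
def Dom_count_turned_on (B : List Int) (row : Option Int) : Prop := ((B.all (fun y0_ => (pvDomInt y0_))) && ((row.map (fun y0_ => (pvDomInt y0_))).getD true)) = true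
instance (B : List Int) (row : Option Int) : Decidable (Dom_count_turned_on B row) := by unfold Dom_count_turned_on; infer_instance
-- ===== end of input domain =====

-- B selects the relevant indices up front and counts each selected row's low 10 bits with a
-- branch-free SWAR popcount (parallel pairwise bit sums) instead of A's per-bit test loop
-- (objective: alternative).

-- ===== PORT A =====
-- Literal port of A: fold over i in range(10); the Option Int accumulator is `none`
-- exactly when B[i] has raised IndexError (those inputs are excluded by Pre_).
def count_turned_on (B : List Int) (row : Option Int) : Int :=
  (((List.range 10).foldl
      (fun (acc : Option Int) (i : Nat) =>
        acc.bind (fun cnt =>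
          if (match row with | none => false | some r => (i : Int) != r) then some cnt
          else
            match PySem.List.pyGet? B (i : Int) with
            | none => none
            | some bi =>
              some ((List.range 10).foldl
                (fun (c : Int) (j : Nat) =>
                  if PySem.Int.band bi ((1 : Int) <<< j) ≠ 0 then c + 1 else c)
                cnt)))
      (some 0)).getD 0)

-- ===== PORT B =====
-- Port of Source B's per-row body: SWAR popcount of the low 10 bits.
def pvSwar (b : Int) : Int :=
  let x0 := PySem.Int.band b 1023
  let x1 := x0 - PySem.Int.band (x0 >>> 1) 0x5555
  let x2 := PySem.Int.band x1 0x3333 + PySem.Int.band (x1 >>> 2) 0x3333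
  let x3 := PySem.Int.band (x2 + (x2 >>> 4)) 0x0F0F
  PySem.Int.band (x3 + (x3 >>> 8)) 0x1F

-- Port of Source B: pick the index list, then one fold adding pvSwar of each indexed row;
-- the Option Int accumulator is `none` exactly when B[i] has raised IndexError.
def count_turned_on_alt (B : List Int) (row : Option Int) : Int :=
  let idxs : List Int :=
    match row with
    | none => PySem.List.pyRange 0 10 1
    | some r => if 0 ≤ r ∧ r < 10 then [r] else []
  ((idxs.foldl
      (fun (acc : Option Int) (i : Int) =>
        acc.bind (fun total => (PySem.List.pyGet? B i).map (fun b => total + pvSwar b)))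
      (some 0)).getD 0)

-- ===== PRECONDITION & SPEC =====
-- Pre_ excludes exactly the inputs on which A raises IndexError: row=None with fewer than
-- 10 rows, or a row index in [0,10) that is past the end of B.
def Pre_count_turned_on (B : List Int) (row : Option Int) : Prop :=
  (row = none → 10 ≤ B.length) ∧
  (0 ≤ row.getD (-1) → row.getD (-1) < 10 → (row.getD (-1)).toNat < B.length)
instance (B : List Int) (row : Option Int) : Decidable (Pre_count_turned_on B row) := by
  unfold Pre_count_turned_on; infer_instance

def pvWitness_count_turned_on : List Int × Option Int :=
  ([1, 3, 1023, 0, 5, 7, 512, 2048, 9, 10], none)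

def Spec_count_turned_on (B : List Int) (row : Option Int) (out : Int) : Prop := out = count_turned_on_alt B row
instance (B : List Int) (row : Option Int) (out : Int) : Decidable (Spec_count_turned_on B row out) := by unfold Spec_count_turned_on; infer_instance

-- ===== CLAIM (what is proved, stated in full; the proofs are below) =====
def Claim_equal_count_turned_on : Prop := ∀ (B : List Int) (row : Option Int), Dom_count_turned_on B row → Pre_count_turned_on B row → Spec_count_turned_on B row (count_turned_on B row)

-- ===== LEMMAS AND PROOFS =====

theorem foldl_if_count (l : List Nat) (P : Nat → Prop) [DecidablePred P] (c0 : Int) :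
    l.foldl (fun c j => if P j then c + 1 else c) c0 = c0 + (l.countP (fun j => decide (P j)) : Nat) := by
  induction l generalizing c0 with
  | nil => simp
  | cons a l ih =>
    simp only [List.foldl_cons, List.countP_cons, ih]
    by_cases h : P a
    · simp [h]; ring_nf
    · simp [h]

theorem shl_one (j : Nat) : (1 : Int) <<< j = ((2 ^ j : Nat) : Int) := by
  simp [Int.shiftLeft_eq]

set_option maxRecDepth 8192 in
theorem swar_nat (m : Nat) (h : m < 1024) :
    pvSwar ((m : Nat) : Int) = (((List.range 10).countP (fun j => m.testBit j) : Nat) : Int) := by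
  revert h; revert m; decide

set_option maxRecDepth 8192 in
theorem compl_testBit : ∀ x : Nat, x < 1024 → ∀ j : Nat, j < 10 → (1023 - x).testBit j = !x.testBit j := by decide

theorem testBit_1023 (n j : Nat) (hj : j < 10) : (n &&& 1023).testBit j = n.testBit j := by
  rw [show (1023 : Nat) = 2 ^ 10 - 1 by norm_num, Nat.testBit_and,
    Nat.testBit_two_pow_sub_one]
  simp [hj]

theorem and_1023_lt (n : Nat) : n &&& 1023 < 1024 := by
  have h : (1023 : Nat) = 2 ^ 10 - 1 := by norm_num
  rw [h, Nat.and_two_pow_sub_one_eq_mod]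
  exact Nat.mod_lt _ (by norm_num)

theorem band_nonneg_eq (c : Nat) (b : Int) (hb : 0 ≤ b) :
    PySem.Int.band b (c : Int) = ((b.toNat &&& c : Nat) : Int) := by
  rw [PySem.Int.band_of_nonneg hb (by positivity)]
  simp

theorem band_neg_eq (c : Nat) (b : Int) (hb : ¬ 0 ≤ b) :
    PySem.Int.band b (c : Int) = ((c - (c &&& (-b - 1).toNat) : Nat) : Int) := by
  rw [PySem.Int.band_comm]
  unfold PySem.Int.band
  rw [if_pos (by positivity), if_neg hb]
  simp

-- the masked low 10 bits of b, as a Nat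
def pvMask (b : Int) : Nat := (PySem.Int.band b 1023).toNat

theorem mask_lt (b : Int) : pvMask b < 1024 := by
  unfold pvMask
  by_cases hb : 0 ≤ b
  · rw [show (1023 : Int) = ((1023 : Nat) : Int) from by norm_num, band_nonneg_eq _ _ hb]
    simpa using and_1023_lt b.toNat
  · rw [show (1023 : Int) = ((1023 : Nat) : Int) from by norm_num, band_neg_eq _ _ hb]
    simp only [Int.toNat_natCast]
    omega

theorem band_1023_eq (b : Int) : PySem.Int.band b 1023 = ((pvMask b : Nat) : Int) := by
  unfold pvMask
  have : 0 ≤ PySem.Int.band b 1023 := by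
    rw [PySem.Int.band_comm]
    exact PySem.Int.band_nonneg_of_nonneg_left _ (by norm_num)
  omega

theorem mask_and_1023 (b : Int) : pvMask b &&& 1023 = pvMask b := by
  have := mask_lt b
  rw [show (1023 : Nat) = 2 ^ 10 - 1 by norm_num, Nat.and_two_pow_sub_one_eq_mod,
    Nat.mod_eq_of_lt this]

-- b's bit test agrees with the masked value's bit, for j < 10
theorem bit_test_eq (b : Int) (j : Nat) (hj : j < 10) :
    (PySem.Int.band b ((1 : Int) <<< j) ≠ 0) ↔ (pvMask b).testBit j = true := by
  by_cases hb : 0 ≤ b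
  · have hm : pvMask b = b.toNat &&& 1023 := by
      unfold pvMask
      rw [show (1023 : Int) = ((1023 : Nat) : Int) from by norm_num, band_nonneg_eq _ _ hb]
      simp
    rw [hm, testBit_1023 _ _ hj, shl_one, band_nonneg_eq _ _ hb, Nat.and_two_pow]
    rcases h : (b.toNat).testBit j <;> simp [h]
  · have hk : pvMask b = 1023 - (1023 &&& (-b - 1).toNat) := by
      unfold pvMask
      rw [show (1023 : Int) = ((1023 : Nat) : Int) from by norm_num, band_neg_eq _ _ hb]
      simp
    have hx : 1023 &&& (-b - 1).toNat < 1024 := by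
      rw [Nat.and_comm]; exact and_1023_lt _
    have h1 : (pvMask b).testBit j = !((-b - 1).toNat).testBit j := by
      rw [hk, compl_testBit _ (by omega) _ hj, Nat.and_comm, testBit_1023 _ _ hj]
    rw [h1, shl_one, band_neg_eq _ _ hb, Nat.and_comm, Nat.and_two_pow]
    have hpow : (2 : Nat) ^ j ≠ 0 := by positivity
    rcases h : ((-b - 1).toNat).testBit j <;> simp [h] <;> omega

-- pvSwar of any int equals the popcount of its masked low 10 bits
theorem swar_eq (b : Int) :
    pvSwar b = (((List.range 10).countP (fun j => (pvMask b).testBit j) : Nat) : Int) := by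
  have hmb : PySem.Int.band ((pvMask b : Nat) : Int) 1023 = ((pvMask b : Nat) : Int) := by
    rw [show (1023 : Int) = ((1023 : Nat) : Int) from by norm_num,
      PySem.Int.band_natCast, mask_and_1023]
  have h1 : pvSwar b = pvSwar ((pvMask b : Nat) : Int) := by
    unfold pvSwar
    rw [band_1023_eq b, hmb]
  rw [h1, swar_nat _ (mask_lt b)]

-- A's inner loop adds exactly pvSwar b to the accumulator
theorem inner_eq (b c0 : Int) :
    (List.range 10).foldl
      (fun (c : Int) (j : Nat) => if PySem.Int.band b ((1 : Int) <<< j) ≠ 0 then c + 1 else c)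
      c0 = c0 + pvSwar b := by
  rw [foldl_if_count (P := fun j => PySem.Int.band b ((1 : Int) <<< j) ≠ 0), swar_eq]
  congr 2
  apply List.countP_congr
  intro j hj
  have hj10 : j < 10 := List.mem_range.mp hj
  have := bit_test_eq b j hj10
  constructor
  · intro h; simpa using this.mp (by simpa using h)
  · intro h; simpa using this.mpr (by simpa using h)

-- A's step for row = some r skips every index different from r (stated after the inner
-- loop has been rewritten to cnt + pvSwar bi by inner_eq)
theorem fold_skip (l : List Nat) (r : Int) (B : List Int) (acc : Option Int)
    (h : ∀ i ∈ l, (i : Int) ≠ r) :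
    l.foldl
      (fun (acc : Option Int) (i : Nat) =>
        acc.bind (fun cnt =>
          if (match (some r : Option Int) with | none => false | some r' => (i : Int) != r') then some cnt
          else
            match PySem.List.pyGet? B (i : Int) with
            | none => none
            | some bi => some (cnt + pvSwar bi))) acc = acc := by
  induction l generalizing acc with
  | nil => rfl
  | cons a l ih =>
    rw [List.foldl_cons]
    have ha : ((a : Int) != r) = true := by
      simpa using h a (List.mem_cons_self ..)
    have hstep : ∀ acc : Option Int, (acc.bind (fun cnt =>
          if (match (some r : Option Int) with | none => false | some r' => ((a : Nat) : Int) != r') then some cnt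
          else
            match PySem.List.pyGet? B ((a : Nat) : Int) with
            | none => none
            | some bi => some (cnt + pvSwar bi))) = acc := by
      intro acc
      cases acc with
      | none => rfl
      | some cnt => simp [ha]
    rw [hstep]
    exact ih acc (fun i hi => h i (List.mem_cons_of_mem _ hi))

theorem range10_split (k : Nat) (hk : k < 10) :
    List.range 10 = List.range k ++ k :: List.range' (k + 1) (9 - k) := by
  interval_cases k <;> rfl

-- ===== VERDICT (by name: the statement is the Claim_ definition above) =====
theorem count_turned_on_spec : Claim_equal_count_turned_on := by
  intro B row _ _
  unfold Spec_count_turned_on count_turned_on count_turned_on_alt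
  cases row with
  | none =>
    have hfun : (fun (acc : Option Int) (i : Nat) =>
        acc.bind (fun cnt =>
          if (match (none : Option Int) with | none => false | some r => (i : Int) != r) then some cnt
          else
            match PySem.List.pyGet? B (i : Int) with
            | none => none
            | some bi =>
              some ((List.range 10).foldl
                (fun (c : Int) (j : Nat) =>
                  if PySem.Int.band bi ((1 : Int) <<< j) ≠ 0 then c + 1 else c)
                cnt)))
        = (fun (acc : Option Int) (i : Nat) =>
            acc.bind (fun total => (PySem.List.pyGet? B ((i : Nat) : Int)).map (fun b => total + pvSwar b))) := by
      funext acc i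
      cases acc with
      | none => rfl
      | some cnt =>
        simp only [Option.bind_some, Bool.false_eq_true, if_false]
        cases hg : PySem.List.pyGet? B ((i : Nat) : Int) with
        | none => rfl
        | some bi => simp only [hg, Option.map_some, inner_eq]
    have hlist : PySem.List.pyRange 0 10 1 = (List.range 10).map (fun (i : Nat) => (i : Int)) := by decide
    simp only [hlist, List.foldl_map]
    rw [hfun]
  | some r =>
    simp only [inner_eq]
    by_cases hr : 0 ≤ r ∧ r < 10
    · have h10 : r.toNat < 10 := by omega
      rw [range10_split r.toNat h10, List.foldl_append, fold_skip _ r B (some 0)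
        (by intro i hi; have := List.mem_range.mp hi; omega)]
      rw [List.foldl_cons]
      have hrr : (((r.toNat : Nat) : Int) != r) = false := by simp; omega
      simp only [Option.bind_some, hrr, Bool.false_eq_true, if_false]
      have hcast : ((r.toNat : Nat) : Int) = r := by omega
      rw [hcast]
      cases hg : PySem.List.pyGet? B r with
      | none =>
        rw [fold_skip _ r B none (by intro i hi; have := List.mem_range'.mp hi; omega)]
        simp [hr, hg]
      | some bi =>
        rw [fold_skip _ r B (some _) (by intro i hi; have := List.mem_range'.mp hi; omega)]
        simp [hr, hg]
    · rw [fold_skip _ r B (some 0) (by intro i hi; have := List.mem_range.mp hi; omega)]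
      simp [hr]
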